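-- pv_equiv track=rewrite | github.com/yrapop01/fable | legacy/tex.py | join_commands
-- ===== SOURCE A (Python) =====
-- def join_commands(s):
--     prev = ''
--     args = []
--     for c in s:
--         if len(prev) > 1 and prev[0] == '\\' and prev[1].isalpha():
--             if len(c) >= 2 and c[0] == '{' and c[-1] == '}':
--                 args.append(c)
--                 continue
--             if len(c) >= 2 and c[0] == '[' and c[-1] == ']':
--                 args.append(c)
--                 continue
--
--             yield [prev] + args
--             prev = c
--             args = []
--             continue
--
--         if prev:
--             yield [prev]
--         prev = c
--     if prev:
--         yield [prev] + args
-- ===== SOURCE B (Python) =====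
-- def _is_arg(t):
--     return (len(t) >= 2 and t[0] == '{' and t[-1] == '}') or \
--            (len(t) >= 2 and t[0] == '[' and t[-1] == ']')
--
--
-- def join_commands(s):
--     toks = list(s)
--     n = len(toks)
--     i = 0
--     while i < n:
--         t = toks[i]
--         if len(t) > 1 and t[0] == '\\' and t[1].isalpha():
--             j = i + 1
--             while j < n and _is_arg(toks[j]):
--                 j += 1
--             yield [t] + toks[i + 1:j]
--             i = j
--         elif t:
--             yield [t]
--             i += 1
--         else:
--             i += 1
-- ===== Notes on version B (the rewrite author's own statement) =====
-- stated objective: alternative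
-- what changed: Replaces A's deferred prev/args state machine (a generator that emits each group one token late) with an indexed forward-lookahead loop that, on seeing a command head, greedily scans ahead over its {...}/[...] argument tokens and yields the whole group on the spot.
import Mathlib
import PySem

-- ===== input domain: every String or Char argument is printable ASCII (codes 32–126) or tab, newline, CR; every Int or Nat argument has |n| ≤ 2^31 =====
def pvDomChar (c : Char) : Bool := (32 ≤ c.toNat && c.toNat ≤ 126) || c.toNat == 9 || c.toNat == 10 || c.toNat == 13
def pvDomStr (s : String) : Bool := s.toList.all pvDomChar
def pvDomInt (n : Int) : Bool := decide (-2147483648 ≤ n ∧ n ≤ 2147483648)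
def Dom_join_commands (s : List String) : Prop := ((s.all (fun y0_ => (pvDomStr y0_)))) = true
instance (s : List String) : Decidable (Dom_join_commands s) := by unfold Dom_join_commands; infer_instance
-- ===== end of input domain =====

-- B replaces A's deferred prev/args state machine with a greedy forward-lookahead that
-- builds each command group on the spot (objective: alternative decomposition, same cost).

-- ===== PORT A =====
-- the 'len(t) > 1 and t[0] == '\\' and t[1].isalpha()' command-head test (identical text in both Pythons)
def pvCmdTok (t : String) : Bool :=
  decide (1 < PySem.Str.len t) && ((PySem.Str.pyGet? t 0).getD ' ' == '\\')
    && PySem.Chars.isalpha ((PySem.Str.pyGet? t 1).getD ' ')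

-- 'len(c) >= 2 and c[0] == o and c[-1] == k' (A tests it for '{','}' and for '[',']')
def pvDelimTok (o k : Char) (c : String) : Bool :=
  decide (2 ≤ PySem.Str.len c) && ((PySem.Str.pyGet? c 0).getD ' ' == o)
    && ((PySem.Str.pyGet? c (-1)).getD ' ' == k)

-- literal port of A: generator as accumulated output list, fold carrying (out, prev, args)
def pvStepA (acc : List (List String) × String × List String) (c : String) :
    List (List String) × String × List String :=
  let (out, prev, args) := acc
  if pvCmdTok prev then
    if pvDelimTok '{' '}' c then (out, prev, args ++ [c])
    else if pvDelimTok '[' ']' c then (out, prev, args ++ [c])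
    else (out ++ [[prev] ++ args], c, [])
  else if prev ≠ "" then (out ++ [[prev]], c, args)
  else (out, c, args)

-- A's trailing 'if prev: yield [prev] + args'
def pvFinishA (st : List (List String) × String × List String) : List (List String) :=
  if st.2.1 ≠ "" then st.1 ++ [[st.2.1] ++ st.2.2] else st.1

def join_commands (s : List String) : List (List String) :=
  pvFinishA (s.foldl pvStepA ([], "", []))

-- ===== PORT B =====
-- Source B's _is_arg
def pvArgTok (c : String) : Bool := pvDelimTok '{' '}' c || pvDelimTok '[' ']' c

-- Source B's inner 'while j < n and _is_arg(toks[j])' lookahead: (collected args, rest)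
def pvScanArgs : List String → List String × List String
  | [] => ([], [])
  | c :: rest =>
    if pvArgTok c then
      let (a, r) := pvScanArgs rest
      (c :: a, r)
    else ([], c :: rest)

theorem pvScanArgs_snd_length (l : List String) : (pvScanArgs l).2.length ≤ l.length := by
  induction l with
  | nil => simp [pvScanArgs]
  | cons c rest ih =>
    simp only [pvScanArgs]
    split
    · exact Nat.le_succ_of_le ih
    · simp

-- literal port of B: the outer while loop as recursion on the remaining tokens;
-- the slice toks[i+1:j] is (pvScanArgs rest).1 and i = j restarts at (pvScanArgs rest).2
def join_commands_alt : List String → List (List String)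
  | [] => []
  | t :: rest =>
    if pvCmdTok t then
      ([t] ++ (pvScanArgs rest).1) :: join_commands_alt (pvScanArgs rest).2
    else if t ≠ "" then [t] :: join_commands_alt rest
    else join_commands_alt rest
termination_by l => l.length
decreasing_by
  · exact Nat.lt_succ_of_le (pvScanArgs_snd_length rest)
  · simp
  · simp

-- ===== PRECONDITION & SPEC =====
def Spec_join_commands (s : List String) (out : List (List String)) : Prop := out = join_commands_alt s
instance (s : List String) (out : List (List String)) : Decidable (Spec_join_commands s out) := by unfold Spec_join_commands; infer_instance

-- ===== CLAIM (what is proved, stated in full; the proofs are below) =====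
def Claim_equal_join_commands : Prop := ∀ (s : List String), Dom_join_commands s → Spec_join_commands s (join_commands s)

-- ===== LEMMAS AND PROOFS =====
theorem pvCmdTok_empty : pvCmdTok "" = false := by decide

theorem pvCmdTok_ne_empty {t : String} (h : pvCmdTok t = true) : t ≠ "" := by
  rintro rfl; exact absurd h (by decide)

theorem alt_nil : join_commands_alt [] = [] := by rw [join_commands_alt]

theorem alt_cons (t : String) (rest : List String) :
    join_commands_alt (t :: rest) =
      if pvCmdTok t then
        ([t] ++ (pvScanArgs rest).1) :: join_commands_alt (pvScanArgs rest).2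
      else if t ≠ "" then [t] :: join_commands_alt rest
      else join_commands_alt rest := by
  rw [join_commands_alt]

-- the result of B as seen from A's loop state (prev, args)
def pvTail (prev : String) (args l : List String) : List (List String) :=
  if pvCmdTok prev then
    ([prev] ++ args ++ (pvScanArgs l).1) :: join_commands_alt (pvScanArgs l).2
  else if prev ≠ "" then [prev] :: join_commands_alt l
  else join_commands_alt l

-- B's answer for the unprocessed tokens, one head token deep
theorem pvTail_start (c : String) (rest : List String) :
    pvTail c [] rest = join_commands_alt (c :: rest) := by
  by_cases hcc : pvCmdTok c = true
  · simp [pvTail, hcc, alt_cons]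
  · by_cases hce : c = "" <;> simp [pvTail, hcc, hce, alt_cons, pvCmdTok_empty]

theorem pv_main (l : List String) : ∀ (out : List (List String)) (prev : String) (args : List String),
    (pvCmdTok prev = true ∨ args = []) →
    pvFinishA (l.foldl pvStepA (out, prev, args)) = out ++ pvTail prev args l := by
  induction l with
  | nil =>
    intro out prev args hinv
    simp only [List.foldl_nil, pvFinishA, pvTail]
    by_cases hc : pvCmdTok prev = true
    · simp [hc, pvCmdTok_ne_empty hc, alt_nil, pvScanArgs]
    · rcases hinv with h | h
      · exact absurd h hc
      · subst h
        by_cases hp : prev = "" <;> simp [hp, hc, alt_nil, pvCmdTok_empty]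
  | cons c rest ih =>
    intro out prev args hinv
    rw [List.foldl_cons]
    by_cases hc : pvCmdTok prev = true
    · by_cases h1 : pvDelimTok '{' '}' c = true
      · have harg : pvArgTok c = true := by simp [pvArgTok, h1]
        rw [show pvStepA (out, prev, args) c = (out, prev, args ++ [c]) by
          simp [pvStepA, hc, h1]]
        rw [ih out prev (args ++ [c]) (Or.inl hc)]
        simp [pvTail, hc, pvScanArgs, harg]
      · by_cases h2 : pvDelimTok '[' ']' c = true
        · have harg : pvArgTok c = true := by simp [pvArgTok, h2]
          rw [show pvStepA (out, prev, args) c = (out, prev, args ++ [c]) by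
            simp [pvStepA, hc, h1, h2]]
          rw [ih out prev (args ++ [c]) (Or.inl hc)]
          simp [pvTail, hc, pvScanArgs, harg]
        · have harg : pvArgTok c = false := by simp [pvArgTok, h1, h2]
          rw [show pvStepA (out, prev, args) c = (out ++ [[prev] ++ args], c, []) by
            simp [pvStepA, hc, h1, h2]]
          rw [ih (out ++ [[prev] ++ args]) c [] (Or.inr rfl)]
          have ht : pvTail prev args (c :: rest) = ([prev] ++ args) :: pvTail c [] rest := by
            rw [pvTail_start c rest]
            simp [pvTail, hc, pvScanArgs, harg]
          rw [ht]; simp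
    · rcases hinv with h | h
      · exact absurd h hc
      · subst h
        by_cases hp : prev = ""
        · subst hp
          rw [show pvStepA (out, "", []) c = (out, c, ([] : List String)) by
            simp [pvStepA, pvCmdTok_empty]]
          rw [ih out c [] (Or.inr rfl)]
          have ht : pvTail "" [] (c :: rest) = pvTail c [] rest := by
            rw [pvTail_start c rest]; simp [pvTail, pvCmdTok_empty]
          rw [ht]
        · rw [show pvStepA (out, prev, []) c = (out ++ [[prev]], c, ([] : List String)) by
            simp [pvStepA, hc, hp]]
          rw [ih (out ++ [[prev]]) c [] (Or.inr rfl)]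
          have ht : pvTail prev [] (c :: rest) = [prev] :: pvTail c [] rest := by
            rw [pvTail_start c rest]
            simp [pvTail, hc, hp]
          rw [ht]; simp

-- ===== VERDICT (by name: the statement is the Claim_ definition above) =====
theorem join_commands_spec : Claim_equal_join_commands := by
  intro s _
  unfold Spec_join_commands join_commands
  have h := pv_main s [] "" [] (Or.inr rfl)
  simpa [pvTail, pvCmdTok_empty] using h
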